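-- pv_equiv track=rewrite | github.com/uvsq22201160/l1-python | exercises/TD04_listes/syracuse.py | altitudeVolMax
-- ===== SOURCE A (Python) =====
-- def syracuse(n):
--     """ Retourne la liste des valeurs de la suite en partant de n jusqu'à 1 """
--     liste = [n]
--     i = 0
--     while liste[i] != 1:
--         if liste[i] % 2 == 0:
--             liste.append(liste[i]//2)
--             i += 1
--         else:
--             liste.append(liste[i]*3 + 1)
--             i += 1
--     return liste
--
-- def altitude(n):
--     ''' Retourne l'altitude maximale d'un vol '''
--     liste = syracuse(n)
--     max = 0
--     for i in range(len(liste)):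
--         if liste[i] > max:
--             max = liste[i]
--     return max
--
-- def altitudeVol(n_max):
--     ''' Retourne les altitudes maximales des vols de 1 à n_max'''
--     liste_altitude = []
--     for i in range(n_max):
--         liste_altitude.append(altitude(i + 1))
--     return liste_altitude
--
-- def altitudeVolMax(n):
--     '''Retourne le vol possedant l'altitude maximale des vols de 1 à n '''
--     liste = altitudeVol(n)
--     max = 0
--     for i in range(n):
--         if liste[i] > max:
--             max = liste[i]
--             vol = i + 1
--     return vol, max
-- ===== SOURCE B (Python) =====
-- def altitudeVolMax(n):
--     '''Retourne le vol possedant l'altitude maximale des vols de 1 a n'''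
--     best_vol = 0
--     best_alt = 0
--     for start in range(1, n + 1):
--         v = start
--         alt = 1
--         while v != 1:
--             if v > alt:
--                 alt = v
--             v = v // 2 if v % 2 == 0 else 3 * v + 1
--         if alt > best_alt:
--             best_alt = alt
--             best_vol = start
--     return best_vol, best_alt
-- ===== Notes on version B (the rewrite author's own statement) =====
-- stated objective: faster
-- what changed: A builds the full Syracuse list per start, scans it for its max, collects all altitudes in a list and scans that again for the argmax; B is one fused pass that tracks a running maximum inside the trajectory loop and the best (vol, altitude) pair across starts, building no lists at all.
-- outside the precondition, e.g. on altitudeVolMax(0): A raises UnboundLocalError, B returns (0, 0)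
import Mathlib
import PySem

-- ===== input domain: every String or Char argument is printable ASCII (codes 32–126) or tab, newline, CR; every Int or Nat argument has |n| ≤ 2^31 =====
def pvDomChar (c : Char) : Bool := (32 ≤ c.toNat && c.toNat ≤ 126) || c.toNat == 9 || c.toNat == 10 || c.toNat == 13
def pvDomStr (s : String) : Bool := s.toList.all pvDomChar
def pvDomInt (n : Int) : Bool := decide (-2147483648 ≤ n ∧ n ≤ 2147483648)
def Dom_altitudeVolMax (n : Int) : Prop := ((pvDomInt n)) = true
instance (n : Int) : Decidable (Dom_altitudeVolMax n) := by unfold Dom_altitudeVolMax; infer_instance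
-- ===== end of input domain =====

-- B fuses A's four loops into one pass with a running maximum and argmax, building no lists (objective: faster, constant factor).
-- Both while-loops are ported with the same fuel bound; on the admitted domain the Collatz trajectory is far shorter than the fuel.

-- fuel for the Syracuse while-loops (trajectories on the domain are far shorter)
def pvFuel : Nat := 1000000

-- ===== PORT A =====
-- syracuse: the while-loop, as structural recursion on fuel over the current value
def syracuseGo : Nat → Int → List Int
  | 0, _ => []
  | f + 1, v =>
    if v = 1 then [v]
    else v :: syracuseGo f (if PySem.Int.mod v 2 = 0 then PySem.Int.floordiv v 2 else v * 3 + 1)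

def syracuse (n : Int) : List Int := syracuseGo pvFuel n

-- altitude: max=0; for each element, if x > max: max = x
def altitude (n : Int) : Int :=
  (syracuse n).foldl (fun m x => if x > m then x else m) 0

-- altitudeVol: append altitude(i+1) for i in range(n)
def altitudeVol (nmax : Int) : List Int :=
  (PySem.List.pyRange 0 nmax 1).foldl (fun acc i => acc ++ [altitude (i + 1)]) []

-- final loop: max=0, vol (unbound in Python before the first update; 0 here — only reachable for n ≤ 0, outside Pre_).
-- liste[i] is always in range (len(liste) = n and 0 ≤ i < n), ported with pyGetD.
def altitudeVolMax (n : Int) : List Int :=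
  let liste := altitudeVol n
  let res := (PySem.List.pyRange 0 n 1).foldl
    (fun (st : Int × Int) i =>
      let x := PySem.List.pyGetD liste i 0
      if x > st.1 then (x, i + 1) else st) (0, 0)
  [res.2, res.1]

-- ===== PORT B =====
-- B's inner while-loop: running maximum over the trajectory, no list
def altGo : Nat → Int → Int → Int
  | 0, _, a => a
  | f + 1, v, a =>
    if v = 1 then a
    else altGo f (if PySem.Int.mod v 2 = 0 then PySem.Int.floordiv v 2 else 3 * v + 1)
               (if v > a then v else a)

def altitudeVolMax_alt (n : Int) : List Int :=
  let res := (PySem.List.pyRange 1 (n + 1) 1).foldl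
    (fun (st : Int × Int) start =>
      let a := altGo pvFuel start 1
      if a > st.2 then (start, a) else st) (0, 0)
  [res.1, res.2]

-- ===== PRECONDITION & SPEC =====
-- For n ≤ 0 Python A raises UnboundLocalError ('vol' never assigned); excluded.
def Pre_altitudeVolMax (n : Int) : Prop := 1 ≤ n
instance (n : Int) : Decidable (Pre_altitudeVolMax n) := by unfold Pre_altitudeVolMax; infer_instance
def pvWitness_altitudeVolMax : Int := 7

def Spec_altitudeVolMax (n : Int) (out : List Int) : Prop := out = altitudeVolMax_alt n
instance (n : Int) (out : List Int) : Decidable (Spec_altitudeVolMax n out) := by unfold Spec_altitudeVolMax; infer_instance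

-- ===== CLAIM (what is proved, stated in full; the proofs are below) =====
def Claim_equal_altitudeVolMax : Prop := ∀ (n : Int), Dom_altitudeVolMax n → Pre_altitudeVolMax n → Spec_altitudeVolMax n (altitudeVolMax n)

-- ===== LEMMAS AND PROOFS =====

-- folding A's max-update over the trajectory list equals B's fused running maximum, for any fuel
theorem foldl_syracuseGo_eq_altGo (f : Nat) : ∀ (v a : Int), 1 ≤ a →
    (syracuseGo f v).foldl (fun m x => if x > m then x else m) a = altGo f v a := by
  induction f with
  | zero => intro v a _; simp [syracuseGo, altGo]
  | succ f ih =>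
    intro v a ha
    by_cases hv : v = 1
    · simp [syracuseGo, altGo, hv]; omega
    · simp only [syracuseGo, altGo, if_neg hv, List.foldl_cons]
      rw [show v * 3 + 1 = 3 * v + 1 by ring]
      exact ih _ _ (by split <;> omega)

-- A's altitude equals B's fused loop for every start value ≥ 1
theorem altitude_eq_altGo (k : Int) (hk : 1 ≤ k) : altitude k = altGo pvFuel k 1 := by
  obtain ⟨f, hf⟩ : ∃ f, pvFuel = f + 1 := ⟨999999, rfl⟩
  rw [altitude, syracuse, hf]
  by_cases hk1 : k = 1
  · subst hk1
    simp only [syracuseGo, altGo]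
    norm_num
  · simp only [syracuseGo, altGo, if_neg hk1, List.foldl_cons]
    rw [show k * 3 + 1 = 3 * k + 1 by ring]
    rw [show ((if k > (0:Int) then k else 0) = k) by omega,
        show ((if k > (1:Int) then k else 1) = k) by omega]
    exact foldl_syracuseGo_eq_altGo f _ k hk

-- the common argmax fold, with the two state orders swapped
theorem argmax_fold_swap (F : Nat → Int) : ∀ (xs : List Nat) (p q : Int),
    xs.foldl (fun (st : Int × Int) k => if F k > st.1 then (F k, (k : Int) + 1) else st) (p, q)
    = Prod.swap (xs.foldl (fun (st : Int × Int) k => if F k > st.2 then ((k : Int) + 1, F k) else st) (q, p)) := by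
  intro xs
  induction xs with
  | nil => intro p q; rfl
  | cons x xs ih =>
    intro p q
    simp only [List.foldl_cons]
    by_cases h : F x > p
    · rw [if_pos h, if_pos h, ih]
    · rw [if_neg h, if_neg h, ih]

-- altitudeVol is the list of altitudes of 1..n
theorem altitudeVol_eq_map (n : Int) :
    altitudeVol n = (PySem.List.pyRange 0 n 1).map (fun i => altitude (i + 1)) := by
  rw [altitudeVol, PySem.List.foldl_append_singleton_eq_map (fun i => altitude (i + 1))]
  simp

theorem main_eq (n : Int) : altitudeVolMax n = altitudeVolMax_alt n := by
  simp only [altitudeVolMax, altitudeVolMax_alt, altitudeVol_eq_map]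
  rw [PySem.List.foldl_congr_mem _ _
        (fun (st : Int × Int) i =>
          if altGo pvFuel (i + 1) 1 > st.1 then (altGo pvFuel (i + 1) 1, i + 1) else st)
        ((0 : Int), (0 : Int))
        (by
          intro acc x hx
          rw [PySem.List.mem_pyRange_one] at hx
          rw [PySem.List.pyGetD_map_pyRange_of_nonneg _ n x 0 hx.1 hx.2,
              altitude_eq_altGo _ (by omega)])]
  rw [PySem.List.pyRange_one 0 n, PySem.List.pyRange_one 1 (n + 1)]
  simp only [sub_zero, add_sub_cancel_right, zero_add, List.foldl_map]
  rw [argmax_fold_swap (fun k => altGo pvFuel ((k : Int) + 1) 1)]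
  simp [add_comm]

-- ===== VERDICT (by name: the statement is the Claim_ definition above) =====
theorem altitudeVolMax_spec : Claim_equal_altitudeVolMax := by
  intro n _ _
  unfold Spec_altitudeVolMax
  exact main_eq n
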